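-- pv_equiv track=rewrite | github.com/XinyuJi/Advent-of-Code | 2025/Day 6: Trash Compactor/6-2.py | do_math_homework
-- ===== SOURCE A (Python) =====
-- def do_math_homework(data):
--     lines = [line.rstrip("\n") for line in data]
--     height = len(lines)
--     width = max(len(line) for line in lines)
--     lines = [line.ljust(width) for line in lines]
--
--     empty_cols = []
--     for c in range(width):
--         if all(lines[r][c] == " " for r in range(height)):
--             empty_cols.append(c)
--
--     segments = []
--     start = 0
--     for c in empty_cols + [width]:
--         if c > start:
--             segments.append((start, c))
--         start = c + 1
--
--     total = 0
--     for left, right in segments: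
--         block = [line[left:right] for line in lines]
--         op = block[-1].strip()
--         if op not in {"+", "*"}:
--             continue
--
--         numbers = []
--         for c in range(right - left - 1, -1, -1):
--             col_digits = [block[r][c] for r in range(height - 1)]
--             col_digits = "".join(d for d in col_digits if d.isdigit())
--             if col_digits:
--                 numbers.append(int(col_digits))
--
--         if not numbers:
--             continue
--
--         if op == "+":
--             total += sum(numbers)
--         else:
--             p = 1
--             for n in numbers:
--                 p *= n
--             total += p
--     return total
-- ===== SOURCE B (Python) =====
-- def do_math_homework(data):
--     lines = [line.rstrip("\n") for line in data]
--     height = len(lines)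
--     width = max(len(line) for line in lines)
--     cols = ["".join(line[c] if c < len(line) else " " for line in lines)
--             for c in range(width)]
--
--     total = 0
--     seg = []
--     for col in cols + [" " * height]:
--         if all(ch == " " for ch in col):
--             total += _segment_value(seg)
--             seg = []
--         else:
--             seg.append(col)
--     return total
--
--
-- def _column_numbers(seg):
--     nums = []
--     for col in seg:
--         digits = "".join(ch for ch in col[:-1] if ch.isdigit())
--         if digits:
--             nums.append(int(digits))
--     return nums
--
--
-- def _segment_value(seg):
--     if not seg:
--         return 0
--     op = "".join(col[-1] for col in seg).strip()
--     if op == "+":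
--         return sum(_column_numbers(seg))
--     if op == "*":
--         nums = _column_numbers(seg)
--         if not nums:
--             return 0
--         p = 1
--         for n in nums:
--             p *= n
--         return p
--     return 0
-- ===== Notes on version B (the rewrite author's own statement) =====
-- stated objective: alternative
-- what changed: B transposes the padded grid into column-strings once and streams over them, flushing a running segment at each all-space column, instead of A's index-based passes that first collect empty column indices, then build (left,right) interval pairs, then re-slice every row per segment.
import Mathlib
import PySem

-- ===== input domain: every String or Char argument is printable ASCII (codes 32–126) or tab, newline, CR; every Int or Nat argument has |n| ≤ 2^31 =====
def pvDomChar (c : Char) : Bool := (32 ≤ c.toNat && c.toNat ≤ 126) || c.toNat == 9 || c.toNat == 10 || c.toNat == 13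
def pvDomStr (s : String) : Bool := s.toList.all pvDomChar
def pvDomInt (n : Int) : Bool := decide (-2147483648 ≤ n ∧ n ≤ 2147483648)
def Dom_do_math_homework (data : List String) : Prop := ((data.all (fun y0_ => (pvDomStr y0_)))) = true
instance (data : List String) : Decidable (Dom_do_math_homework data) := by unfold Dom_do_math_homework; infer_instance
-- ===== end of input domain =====

-- B streams over the transposed column list, flushing a running segment at each all-space
-- column, instead of A's index passes (empty-column indices, then interval pairs, then
-- per-segment row slices); alternative decomposition, same asymptotic cost.

-- ===== PORT A =====

-- exact port of s.rstrip("\n"): drop trailing '\n' characters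
def pyRstripNl (cs : List Char) : List Char :=
  (cs.reverse.dropWhile (· == '\n')).reverse

-- exact port of s.ljust(w): pad on the right with spaces to width w
def pyLjust (cs : List Char) (w : Nat) : List Char :=
  cs ++ List.replicate (w - cs.length) ' '

def aMain (lines0 : List (List Char)) : Int :=
  let height := lines0.length
  -- max(len(line) for line in lines): ValueError on empty data; Pre_ excludes data = []
  let width := (PySem.List.max? (lines0.map (fun l => l.length)) (fun x => x)).getD 0
  let lines := lines0.map (fun l => pyLjust l width)
  let empty_cols := (PySem.List.pyRange 0 (width : Int) 1).foldl (fun acc c =>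
      if (PySem.List.pyRange 0 (height : Int) 1).all
           (fun r => PySem.List.pyGetD (PySem.List.pyGetD lines r []) c ' ' == ' ')
      then acc ++ [c] else acc) []
  let segments := ((empty_cols ++ [(width : Int)]).foldl
      (fun (p : List (Int × Int) × Int) c =>
        if p.2 < c then (p.1 ++ [(p.2, c)], c + 1) else (p.1, c + 1)) ([], 0)).1
  segments.foldl (fun total lr =>
    let block := lines.map (fun line => PySem.List.slice line (some lr.1) (some lr.2))
    let op := PySem.Chars.strip (PySem.List.pyGetD block (-1) [])
    if op = ['+'] ∨ op = ['*'] then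
      let numbers := (PySem.List.pyRange (lr.2 - lr.1 - 1) (-1) (-1)).foldl (fun nums c =>
          let col_digits := ((PySem.List.pyRange 0 ((height : Int) - 1) 1).map
              (fun r => PySem.List.pyGetD (PySem.List.pyGetD block r []) c ' ')).filter
              (fun d => PySem.Chars.isdigit d)
          if col_digits ≠ [] then nums ++ [(PySem.Int.ofChars? col_digits).getD 0] else nums) []
      if numbers = [] then total
      else if op = ['+'] then total + numbers.sum
      else total + numbers.foldl (fun p n => p * n) 1
    else total) 0

def do_math_homework (data : List String) : Int :=
  aMain (data.map (fun s => pyRstripNl s.toList))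

-- ===== PORT B =====

def colNumbersB (seg : List (List Char)) : List Int :=
  seg.foldl (fun nums col =>
    let digits := (PySem.List.slice col none (some (-1))).filter
        (fun ch => PySem.Chars.isdigit ch)
    if digits ≠ [] then nums ++ [(PySem.Int.ofChars? digits).getD 0] else nums) []

def segValueB (seg : List (List Char)) : Int :=
  if seg = [] then 0
  else
    let op := PySem.Chars.strip
        (PySem.Chars.join [] (seg.map (fun col => [PySem.List.pyGetD col (-1) ' '])))
    if op = ['+'] then (colNumbersB seg).sum
    else if op = ['*'] then
      let nums := colNumbersB seg
      if nums = [] then 0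
      else nums.foldl (fun p n => p * n) 1
    else 0

def bMain (lines : List (List Char)) : Int :=
  let height := lines.length
  let width : Nat := (PySem.List.max? (lines.map (fun l => l.length)) (fun x => x)).getD 0
  let cols := (PySem.List.pyRange 0 (width : Int) 1).map (fun c =>
      lines.map (fun line =>
        if c < (line.length : Int) then PySem.List.pyGetD line c ' ' else ' '))
  ((cols ++ [List.replicate height ' ']).foldl
      (fun (p : Int × List (List Char)) col =>
        if col.all (fun ch => ch == ' ') then (p.1 + segValueB p.2, [])
        else (p.1, p.2 ++ [col])) (0, [])).1

def do_math_homework_alt (data : List String) : Int :=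
  bMain (data.map (fun s => pyRstripNl s.toList))

-- ===== PRECONDITION & SPEC =====
-- Pre_ excludes only the empty list, on which Python's max() raises ValueError in A (and in B).
def Pre_do_math_homework (data : List String) : Prop := data ≠ []
instance (data : List String) : Decidable (Pre_do_math_homework data) := by
  unfold Pre_do_math_homework; infer_instance

def pvWitness_do_math_homework : List String := ["1", "+"]

def Spec_do_math_homework (data : List String) (out : Int) : Prop := out = do_math_homework_alt data
instance (data : List String) (out : Int) : Decidable (Spec_do_math_homework data out) := by
  unfold Spec_do_math_homework; infer_instance

-- ===== CLAIM (what is proved, stated in full; the proofs are below) =====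
def Claim_equal_do_math_homework : Prop := ∀ (data : List String), Dom_do_math_homework data → Pre_do_math_homework data → Spec_do_math_homework data (do_math_homework data)

-- ===== LEMMAS AND PROOFS =====

-- all-space test used by both sides (definitionally B's flush test)
def emptyB (col : List Char) : Bool := col.all (fun ch => ch == ' ')

-- column c of a grid, reading missing cells as spaces
def colP (lines : List (List Char)) (c : Nat) : List Char :=
  lines.map (fun row => row.getD c ' ')

-- A's segment intervals, built from the list of empty-column indices
def segsFrom (s : Nat) : List Nat → Nat → List (Nat × Nat)
  | [], n => if s < n then [(s, n)] else []
  | e :: es, n => (if s < e then [(s, e)] else []) ++ segsFrom (e + 1) es n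

-- indices of all-space columns
def emptyIdx : List (List Char) → List Nat
  | [] => []
  | c :: cs => (if emptyB c then [0] else []) ++ (emptyIdx cs).map (· + 1)

-- value of B's streaming loop from a pending segment
def runsVal (seg : List (List Char)) : List (List Char) → Int
  | [] => segValueB seg
  | c :: cs => if emptyB c then segValueB seg + runsVal [] cs else runsVal (seg ++ [c]) cs

lemma pyLjust_length (cs : List Char) (w : Nat) (h : cs.length ≤ w) :
    (pyLjust cs w).length = w := by
  simp [pyLjust]; omega

lemma pyLjust_getD (cs : List Char) (w c : Nat) :
    (pyLjust cs w).getD c ' ' = cs.getD c ' ' := by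
  rcases lt_or_ge c cs.length with h | h
  · simp [pyLjust, List.getD_eq_getElem?_getD, List.getElem?_append_left h]
  · have h2 : cs.getD c ' ' = ' ' := by
      simp [List.getD_eq_getElem?_getD, List.getElem?_eq_none (by omega : cs.length ≤ c)]
    rw [h2]
    simp only [pyLjust, List.getD_eq_getElem?_getD, List.getElem?_append_right h,
      List.getElem?_replicate]
    split <;> simp

lemma mapGetD_range {α : Type} (xs : List α) (d : α) :
    (List.range xs.length).map (fun r => xs.getD r d) = xs := by
  apply List.ext_getElem (by simp)
  intro i h1 h2
  simp [List.getElem?_eq_getElem h2]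

lemma descRange (k : Nat) :
    PySem.List.pyRange ((k : Int) - 1) (-1) (-1) =
      List.map (Nat.cast : Nat → Int) ((List.range k).reverse) := by
  cases k with
  | zero => simp [PySem.List.pyRange]
  | succ m =>
    rw [PySem.List.pyRange]
    rw [if_neg (by norm_num : ¬ (-1 : Int) = 0)]
    rw [if_neg (by norm_num : ¬ (0 : Int) < -1)]
    rw [if_pos (by push_cast; omega : (-1 : Int) < ((m + 1 : Nat) : Int) - 1)]
    have hc : ((((m + 1 : Nat) : Int) - 1 - -1 + - -1 - 1) / - -1).toNat = m + 1 := by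
      push_cast; omega
    rw [hc]
    dsimp only
    have hrev : ((List.range (m + 1)).reverse) = List.map (fun x => m - x) (List.range (m + 1)) := by
      apply List.ext_getElem (by simp)
      intro i h1 h2
      simp [List.getElem_reverse]
    rw [hrev, List.map_map]
    apply List.map_congr_left
    intro a ha
    simp only [Function.comp]
    simp at ha
    omega

lemma segsFold (n : Nat) : ∀ (es : List Nat) (acc : List (Int × Int)) (s : Nat),
    (((es.map (Nat.cast : Nat → Int)) ++ [(n : Int)]).foldl
      (fun (p : List (Int × Int) × Int) c =>
        if p.2 < c then (p.1 ++ [(p.2, c)], c + 1) else (p.1, c + 1)) (acc, (s : Int)))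
    = (acc ++ (segsFrom s es n).map (fun q => ((q.1 : Int), (q.2 : Int))), (n : Int) + 1) := by
  intro es
  induction es with
  | nil =>
    intro acc s
    simp only [List.map_nil, List.nil_append, List.foldl_cons, List.foldl_nil]
    by_cases h : s < n
    · have h' : (s : Int) < (n : Int) := by exact_mod_cast h
      simp [segsFrom, h, h']
    · have h' : ¬ (s : Int) < (n : Int) := by exact_mod_cast h
      simp [segsFrom, h, h']
  | cons e es ih =>
    intro acc s
    simp only [List.map_cons, List.cons_append, List.foldl_cons]
    have he1 : ((e : Int) + 1) = ((e + 1 : Nat) : Int) := by push_cast; ring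
    by_cases h : s < e
    · have h' : (s : Int) < (e : Int) := by exact_mod_cast h
      rw [if_pos h', he1, ih]
      simp [segsFrom, h]
    · have h' : ¬ (s : Int) < (e : Int) := by exact_mod_cast h
      rw [if_neg h', he1, ih]
      simp [segsFrom, h]

lemma segsFrom_shift (a : Nat) : ∀ (es : List Nat) (s n : Nat),
    segsFrom (s + a) (es.map (· + a)) (n + a) =
      (segsFrom s es n).map (fun p => (p.1 + a, p.2 + a)) := by
  intro es
  induction es with
  | nil =>
    intro s n
    by_cases h : s < n
    · simp [segsFrom, h, Nat.add_lt_add_right h a]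
    · simp [segsFrom, h]
  | cons e es ih =>
    intro s n
    have hre : e + a + 1 = (e + 1) + a := by omega
    by_cases h : s < e
    · simp [segsFrom, h, Nat.add_lt_add_right h a, hre, ih]
    · simp [segsFrom, h, hre, ih]

lemma segsFrom_bounds (n : Nat) : ∀ (es : List Nat) (s : Nat),
    (∀ e ∈ es, e < n) → ∀ p ∈ segsFrom s es n, p.1 < p.2 ∧ p.2 ≤ n := by
  intro es
  induction es with
  | nil =>
    intro s hes p hp
    by_cases h : s < n
    · simp [segsFrom, h] at hp; subst hp; omega
    · simp [segsFrom, h] at hp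
  | cons e es ih =>
    intro s hes p hp
    simp only [segsFrom, List.mem_append] at hp
    rcases hp with hp | hp
    · by_cases h : s < e
      · simp [h] at hp
        subst hp
        exact ⟨h, le_of_lt (hes e (by simp))⟩
      · simp [h] at hp
    · exact ih (e + 1) (fun x hx => hes x (by simp [hx])) p hp

lemma emptyIdx_spec : ∀ (cs : List (List Char)),
    emptyIdx cs = (List.range cs.length).filter (fun i => emptyB (cs.getD i [])) := by
  intro cs
  induction cs with
  | nil => simp [emptyIdx]
  | cons c cs ih =>
    by_cases he : emptyB c <;>
      simp [emptyIdx, ih, List.range_succ_eq_map, he, List.filter_map,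
        Function.comp_def, Nat.succ_eq_add_one]

lemma segValueB_nil : segValueB [] = 0 := rfl

-- the central correspondence: A's interval sum equals B's streaming value
lemma G : ∀ (cs pre : List (List Char)), (∀ c ∈ pre, emptyB c = false) →
    (((segsFrom 0 ((emptyIdx cs).map (· + pre.length)) (pre.length + cs.length)).map
      (fun p => segValueB (((pre ++ cs).drop p.1).take (p.2 - p.1)))).sum) = runsVal pre cs := by
  intro cs
  induction cs with
  | nil =>
    intro pre hpre
    by_cases hp : pre = []
    · subst hp
      simp [emptyIdx, segsFrom, runsVal, segValueB_nil]
    · have hl : 0 < pre.length := List.length_pos_of_ne_nil hp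
      simp [emptyIdx, segsFrom, hl, runsVal]
  | cons c cs ih =>
    intro pre hpre
    by_cases he : emptyB c = true
    · have hidx : (emptyIdx (c :: cs)).map (· + pre.length)
          = pre.length :: (emptyIdx cs).map (· + (pre.length + 1)) := by
        simp only [emptyIdx, he, if_pos, List.singleton_append, List.map_cons, List.map_map,
          Nat.zero_add]
        congr 1
        apply List.map_congr_left; intro a _; simp [Function.comp]; omega
      rw [hidx, show pre.length + (c :: cs).length = cs.length + (pre.length + 1) by
        simp; omega]
      rw [segsFrom]
      have hsh := segsFrom_shift (pre.length + 1) (emptyIdx cs) 0 cs.length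
      rw [Nat.zero_add] at hsh
      rw [hsh, List.map_append, List.sum_append, List.map_map]
      have hmap : List.map ((fun p => segValueB (((pre ++ c :: cs).drop p.1).take (p.2 - p.1))) ∘
            (fun p => (p.1 + (pre.length + 1), p.2 + (pre.length + 1))))
            (segsFrom 0 (emptyIdx cs) cs.length)
          = List.map (fun p => segValueB ((cs.drop p.1).take (p.2 - p.1)))
            (segsFrom 0 (emptyIdx cs) cs.length) := by
        apply List.map_congr_left
        intro p _
        simp only [Function.comp]
        have h1 : List.drop (p.1 + (pre.length + 1)) (pre ++ c :: cs) = List.drop p.1 cs := by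
          rw [show pre ++ c :: cs = (pre ++ [c]) ++ cs by simp, List.drop_append,
            List.drop_eq_nil_of_le (by simp), List.nil_append,
            show p.1 + (pre.length + 1) - (pre ++ [c]).length = p.1 by simp]
        have h2 : p.2 + (pre.length + 1) - (p.1 + (pre.length + 1)) = p.2 - p.1 := by omega
        rw [h1, h2]
      rw [hmap]
      have hih := ih [] (by simp)
      simp only [List.length_nil, Nat.zero_add, Nat.add_zero, List.nil_append,
        List.map_id'] at hih
      rw [hih]
      rw [runsVal, if_pos he]
      by_cases hp : pre = []
      · subst hp; simp [segValueB_nil]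
      · have hl : 0 < pre.length := List.length_pos_of_ne_nil hp
        rw [if_pos hl]
        simp [List.take_append_of_le_length (le_refl pre.length)]
    · have he' : emptyB c = false := Bool.eq_false_iff.mpr he
      have hidx : (emptyIdx (c :: cs)).map (· + pre.length)
          = (emptyIdx cs).map (· + (pre ++ [c]).length) := by
        simp [emptyIdx, he', List.map_map]
        intro a _
        omega
      rw [hidx, show pre.length + (c :: cs).length = (pre ++ [c]).length + cs.length by
        simp; omega]
      rw [show pre ++ c :: cs = (pre ++ [c]) ++ cs by simp]
      rw [ih (pre ++ [c]) (by
        intro x hx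
        rcases List.mem_append.mp hx with hx | hx
        · exact hpre x hx
        · simp at hx; subst hx; exact he')]
      rw [runsVal, if_neg (by rw [he']; exact Bool.false_ne_true)]

lemma foldB (fcol : List Char) (hf : emptyB fcol = true) :
    ∀ (cs : List (List Char)) (t : Int) (seg : List (List Char)),
    ((cs ++ [fcol]).foldl
      (fun (p : Int × List (List Char)) col =>
        if col.all (fun ch => ch == ' ') then (p.1 + segValueB p.2, [])
        else (p.1, p.2 ++ [col])) (t, seg)).1 = t + runsVal seg cs := by
  intro cs
  induction cs with
  | nil =>
    intro t seg
    rw [List.nil_append, List.foldl_cons, List.foldl_nil,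
      if_pos (show fcol.all (fun ch => ch == ' ') = true from hf)]
    simp [runsVal]
  | cons c cs ih =>
    intro t seg
    rw [List.cons_append, List.foldl_cons]
    by_cases h : c.all (fun ch => ch == ' ') = true
    · have he : emptyB c = true := h
      rw [if_pos h]
      show ((cs ++ [fcol]).foldl _ (t + segValueB seg, [])).1 = _
      rw [ih]
      simp [runsVal, he, add_assoc]
    · have he : emptyB c = false := by
        rw [emptyB]; exact Bool.eq_false_iff.mpr h
      rw [if_neg h]
      show ((cs ++ [fcol]).foldl _ (t, seg ++ [c])).1 = _
      rw [ih]
      simp [runsVal, he]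

lemma getLast_map_f {α β : Type} (f : α → β) (l : List α) (h : l ≠ [])
    (h2 : l.map f ≠ []) : (l.map f).getLast h2 = f (l.getLast h) := by
  have hm := List.getLast?_map (f := f) (l := l)
  rw [List.getLast?_eq_some_getLast h2, List.getLast?_eq_some_getLast h] at hm
  simpa using hm

-- the final per-segment case analysis, over an abstract op string and number list
lemma branch_eq (L : List Char) (NS : List Int) (t : Int) :
    (if L = ['+'] ∨ L = ['*'] then
       if NS.reverse = [] then t
       else if L = ['+'] then t + NS.reverse.sum
       else t + NS.reverse.foldl (fun p n => p * n) 1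
     else t)
    = t + (if L = ['+'] then NS.sum
           else if L = ['*'] then (if NS = [] then 0 else NS.foldl (fun p n => p * n) 1)
           else 0) := by
  by_cases h1 : L = ['+']
  · by_cases hn : NS = []
    · simp [h1, hn]
    · simp [h1, hn, List.sum_reverse]
  · by_cases h2 : L = ['*']
    · by_cases hn : NS = []
      · simp [h1, h2, hn]
      · have hfold : NS.reverse.foldl (fun p n => p * n) 1 = NS.foldl (fun p n => p * n) 1 := by
          rw [← List.prod_eq_foldl, ← List.prod_eq_foldl, List.prod_reverse]
        rw [if_pos (Or.inr h2), if_neg (show ¬ NS.reverse = [] by simpa using hn),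
          if_neg h1, if_neg h1, if_pos h2, if_neg hn, hfold]
    · simp [h1, h2]

-- per-segment: one iteration of A's main loop adds exactly segValueB of the column slice
lemma seg_step (lines : List (List Char)) (W : Nat)
    (hne : lines ≠ []) (hlen : ∀ row ∈ lines, row.length = W)
    (ht : Nat) (hth : ht = lines.length)
    (l r : Nat) (hlr : l < r) (hrW : r ≤ W) (t : Int) :
    (let block := lines.map (fun line => PySem.List.slice line (some ((l : Nat) : Int)) (some ((r : Nat) : Int)))
     let op := PySem.Chars.strip (PySem.List.pyGetD block (-1) [])
     if op = ['+'] ∨ op = ['*'] then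
       let numbers := (PySem.List.pyRange (((r : Nat) : Int) - ((l : Nat) : Int) - 1) (-1) (-1)).foldl (fun nums c =>
           let col_digits := ((PySem.List.pyRange 0 ((ht : Int) - 1) 1).map
               (fun rr => PySem.List.pyGetD (PySem.List.pyGetD block rr []) c ' ')).filter
               (fun d => PySem.Chars.isdigit d)
           if col_digits ≠ [] then nums ++ [(PySem.Int.ofChars? col_digits).getD 0] else nums) []
       if numbers = [] then t
       else if op = ['+'] then t + numbers.sum
       else t + numbers.foldl (fun p n => p * n) 1
     else t)
    = t + segValueB (((((List.range W).map (colP lines))).drop l).take (r - l)) := by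
  subst hth
  have hH : 0 < lines.length := List.length_pos_of_ne_nil hne
  have hbne : lines.map (fun line => PySem.List.slice line (some ((l : Nat) : Int)) (some ((r : Nat) : Int))) ≠ [] := by
    simpa using hne
  have hsegeq : ((((List.range W).map (colP lines))).drop l).take (r - l)
      = (List.range (r - l)).map (fun k => colP lines (l + k)) := by
    apply List.ext_getElem
    · simp; omega
    · intro i h1 h2
      simp only [List.getElem_take, List.getElem_drop, List.getElem_map, List.getElem_range]
  rw [hsegeq]
  -- op: last row of the block is the list of last entries of the segment's columns
  have hop : PySem.List.pyGetD (lines.map (fun line => PySem.List.slice line (some ((l : Nat) : Int)) (some ((r : Nat) : Int)))) (-1) []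
      = ((List.range (r - l)).map (fun k => colP lines (l + k))).map
          (fun col => PySem.List.pyGetD col (-1) ' ') := by
    rw [PySem.List.pyGetD_neg_one _ _ hbne, getLast_map_f _ _ hne hbne,
      PySem.List.slice_natCast, List.map_map]
    have hWlast : (lines.getLast hne).length = W := hlen _ (List.getLast_mem hne)
    apply List.ext_getElem
    · simp [hWlast]; omega
    · intro i h1 h2
      simp only [List.getElem_take, List.getElem_drop, List.getElem_map, List.getElem_range,
        Function.comp]
      have hcne : colP lines (l + i) ≠ [] := by simp [colP, hne]
      rw [show colP lines (l + i) = lines.map (fun row => row.getD (l + i) ' ') from rfl] at hcne ⊢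
      rw [PySem.List.pyGetD_neg_one _ _ hcne, getLast_map_f _ _ hne hcne,
        List.getD_eq_getElem _ _ (by rw [hWlast]; simp at h1; omega)]
  -- numbers: A's right-to-left digit collection is the reverse of B's left-to-right one
  have hnum : (PySem.List.pyRange (((r : Nat) : Int) - ((l : Nat) : Int) - 1) (-1) (-1)).foldl (fun nums c =>
        let col_digits := ((PySem.List.pyRange 0 ((lines.length : Int) - 1) 1).map
            (fun rr => PySem.List.pyGetD (PySem.List.pyGetD (lines.map (fun line => PySem.List.slice line (some ((l : Nat) : Int)) (some ((r : Nat) : Int)))) rr []) c ' ')).filter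
            (fun d => PySem.Chars.isdigit d)
        if col_digits ≠ [] then nums ++ [(PySem.Int.ofChars? col_digits).getD 0] else nums) []
      = (colNumbersB ((List.range (r - l)).map (fun k => colP lines (l + k)))).reverse := by
    rw [show (((r : Nat) : Int) - ((l : Nat) : Int) - 1) = (((r - l : Nat) : Int)) - 1 by omega]
    rw [descRange (r - l), List.foldl_map]
    have hcongr : ∀ (acc : List Int) (c : Nat), c ∈ (List.range (r - l)).reverse →
        (fun (nums : List Int) (c : Nat) =>
          (let col_digits := ((PySem.List.pyRange 0 ((lines.length : Int) - 1) 1).map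
              (fun rr => PySem.List.pyGetD (PySem.List.pyGetD (lines.map (fun line => PySem.List.slice line (some ((l : Nat) : Int)) (some ((r : Nat) : Int)))) rr []) ((c : Nat) : Int) ' ')).filter
              (fun d => PySem.Chars.isdigit d)
           if col_digits ≠ [] then nums ++ [(PySem.Int.ofChars? col_digits).getD 0] else nums)) acc c
        = (fun (nums : List Int) (c : Nat) =>
            if (((colP lines (l + c)).dropLast).filter (fun d => PySem.Chars.isdigit d)) ≠ []
            then nums ++ [(PySem.Int.ofChars? (((colP lines (l + c)).dropLast).filter (fun d => PySem.Chars.isdigit d))).getD 0]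
            else nums) acc c := by
      intro acc c hc
      have hcr : c < r - l := by
        rw [List.mem_reverse, List.mem_range] at hc
        exact hc
      have hinner : ((PySem.List.pyRange 0 ((lines.length : Int) - 1) 1).map
          (fun rr => PySem.List.pyGetD (PySem.List.pyGetD (lines.map (fun line => PySem.List.slice line (some ((l : Nat) : Int)) (some ((r : Nat) : Int)))) rr []) ((c : Nat) : Int) ' '))
          = (colP lines (l + c)).dropLast := by
        rw [show ((lines.length : Int) - 1) = (((lines.length - 1 : Nat)) : Int) by omega]
        rw [PySem.List.pyRange_zero_natCast, List.map_map]
        apply List.ext_getElem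
        · simp [colP]
        · intro i h1 h2
          simp only [List.getElem_map, List.getElem_range, Function.comp]
          have hiL : i < lines.length - 1 := by simpa using h1
          simp only [PySem.List.pyGetD_natCast]
          rw [List.getD_eq_getElem (lines.map (fun line => PySem.List.slice line (some ((l : Nat) : Int)) (some ((r : Nat) : Int)))) [] (by simp; omega)]
          simp only [List.getElem_map]
          rw [PySem.List.slice_natCast]
          have hWrow : lines[i].length = W := hlen _ (List.getElem_mem _)
          rw [List.getD_eq_getElem (List.take (r - l) (List.drop l lines[i])) ' ' (by simp [hWrow]; omega)]
          simp only [List.getElem_take, List.getElem_drop, List.getElem_dropLast, colP,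
            List.getElem_map]
          rw [List.getD_eq_getElem lines[i] ' ' (by rw [hWrow]; omega)]
      simp only [hinner]
    rw [PySem.List.foldl_congr_mem _ _ _ _ hcongr]
    rw [PySem.List.foldl_append_ite
        (p := fun c => (((colP lines (l + c)).dropLast).filter (fun d => PySem.Chars.isdigit d)) ≠ [])
        (f := fun c => (PySem.Int.ofChars? (((colP lines (l + c)).dropLast).filter (fun d => PySem.Chars.isdigit d))).getD 0)]
    rw [List.nil_append, List.filter_reverse, List.map_reverse]
    congr 1
    rw [colNumbersB]
    simp only [PySem.List.slice_to_neg_one]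
    rw [PySem.List.foldl_append_ite
        (fun col => ((col.dropLast).filter (fun ch => PySem.Chars.isdigit ch)) ≠ [])
        (fun col => (PySem.Int.ofChars? ((col.dropLast).filter (fun ch => PySem.Chars.isdigit ch))).getD 0)
        (List.map (fun k => colP lines (l + k)) (List.range (r - l))) []]
    rw [List.nil_append, List.filter_map, List.map_map]
    simp only [Function.comp_def]
  dsimp only
  rw [hop, hnum]
  rw [segValueB]
  have hsegne : (List.range (r - l)).map (fun k => colP lines (l + k)) ≠ [] := by
    simp
    omega
  rw [if_neg hsegne]
  have hjoin : PySem.Chars.join []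
      (((List.range (r - l)).map (fun k => colP lines (l + k))).map
        (fun col => [PySem.List.pyGetD col (-1) ' ']))
      = ((List.range (r - l)).map (fun k => colP lines (l + k))).map
        (fun col => PySem.List.pyGetD col (-1) ' ') := by
    rw [show (((List.range (r - l)).map (fun k => colP lines (l + k))).map
        (fun col => [PySem.List.pyGetD col (-1) ' ']))
      = (((List.range (r - l)).map (fun k => colP lines (l + k))).map
        (fun col => PySem.List.pyGetD col (-1) ' ')).map (fun ch => [ch]) from by
        simp only [List.map_map, Function.comp_def]]
    exact PySem.Chars.join_nil_singletons _
  rw [hjoin]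
  exact branch_eq _ _ _

-- the shared-prelude core equivalence, on the raw (rstripped) lines
lemma core (lines0 : List (List Char)) (hne : lines0 ≠ []) :
    aMain lines0 = bMain lines0 := by
  simp only [aMain, bMain]
  set W := (PySem.List.max? (lines0.map (fun l => l.length)) (fun x => x)).getD 0 with hWdef
  set lines := lines0.map (fun l => pyLjust l W) with hlinesdef
  have hWb : ∀ x ∈ lines0, x.length ≤ W := by
    intro x hx
    cases hmax : PySem.List.max? (lines0.map (fun l => l.length)) (fun x => x) with
    | none =>
      rw [PySem.List.max?_eq_none_iff] at hmax
      exact absurd (List.map_eq_nil_iff.mp hmax) hne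
    | some m =>
      have := PySem.List.max?_isMax hmax x.length (List.mem_map_of_mem hx)
      simpa [hWdef, hmax] using this
  have hlen : ∀ row ∈ lines, row.length = W := by
    intro row hr
    obtain ⟨l0, hl0, rfl⟩ := List.mem_map.mp hr
    exact pyLjust_length _ _ (hWb _ hl0)
  have hlines_ne : lines ≠ [] := by simpa [hlinesdef] using hne
  have hlen0 : lines0.length = lines.length := by simp [hlinesdef]
  -- A empty-columns loop = filtered index list
  have hP : ∀ (c : Nat), ((PySem.List.pyRange 0 ((lines0.length : Int)) 1).all
      (fun r => PySem.List.pyGetD (PySem.List.pyGetD lines r []) ((c : Nat) : Int) ' ' == ' '))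
      = emptyB (colP lines c) := by
    intro c
    rw [PySem.List.pyRange_zero_natCast, List.all_map]
    simp only [Function.comp_def, PySem.List.pyGetD_natCast]
    have h' : lines.all (fun row => (row.getD c ' ' == ' '))
        = (List.range lines.length).all (fun r => ((lines.getD r []).getD c ' ' == ' ')) := by
      conv_lhs => rw [← mapGetD_range lines ([] : List Char)]
      rw [List.all_map]
      rfl
    have h'' : emptyB (colP lines c) = lines.all (fun row => (row.getD c ' ' == ' ')) := by
      simp only [emptyB, colP, List.all_map]
      rfl
    rw [hlen0, h'', h']
  have h1 : (PySem.List.pyRange 0 (W : Int) 1).foldl (fun acc c =>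
        if (PySem.List.pyRange 0 ((lines0.length : Int)) 1).all
            (fun r => PySem.List.pyGetD (PySem.List.pyGetD lines r []) c ' ' == ' ')
        then acc ++ [c] else acc) []
      = ((List.range W).filter (fun c => emptyB (colP lines c))).map (Nat.cast : Nat → Int) := by
    rw [PySem.List.pyRange_zero_natCast W, List.foldl_map]
    rw [PySem.List.foldl_congr_mem _ _ (fun (acc : List Int) (c : Nat) =>
        if emptyB (colP lines c) then acc ++ [(c : Int)] else acc) _
      (by
        intro acc c _
        rw [hP c])]
    rw [PySem.List.foldl_append_if (fun c => emptyB (colP lines c)) (fun c => (c : Int))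
      (List.range W) []]
    rw [List.nil_append]
  rw [h1]
  have h2 := segsFold W ((List.range W).filter (fun c => emptyB (colP lines c))) [] 0
  simp only [Nat.cast_zero, List.nil_append] at h2
  rw [h2]
  have hElt : ∀ e ∈ (List.range W).filter (fun c => emptyB (colP lines c)), e < W := by
    intro e he
    exact List.mem_range.mp (List.mem_of_mem_filter he)
  rw [List.foldl_map]
  rw [PySem.List.foldl_congr_mem _ _ (fun (total : Int) (p : Nat × Nat) =>
      total + segValueB ((((List.range W).map (colP lines)).drop p.1).take (p.2 - p.1))) _
    (by
      intro acc p hp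
      have hb := segsFrom_bounds W _ 0 hElt p hp
      have hs := seg_step lines W hlines_ne hlen lines0.length hlen0 p.1 p.2 hb.1 hb.2 acc
      simpa using hs)]
  rw [PySem.List.foldl_add]
  -- identify the filtered indices with emptyIdx of the column list
  have hE : (List.range W).filter (fun c => emptyB (colP lines c))
      = emptyIdx ((List.range W).map (colP lines)) := by
    rw [emptyIdx_spec]
    simp only [List.length_map, List.length_range]
    apply List.filter_congr
    intro c hc
    rw [PySem.List.getD_map_range _ _ _ _ (List.mem_range.mp hc)]
  rw [hE]
  have hG := G ((List.range W).map (colP lines)) [] (by simp)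
  simp only [List.length_nil, Nat.zero_add, Nat.add_zero, List.nil_append,
    List.map_id', List.length_map, List.length_range] at hG
  rw [hG, zero_add]
  -- B side: its column list is the padded column list
  have hcolsB : (PySem.List.pyRange 0 (W : Int) 1).map (fun c =>
        lines0.map (fun line => if c < (line.length : Int) then PySem.List.pyGetD line c ' ' else ' '))
      = (List.range W).map (colP lines) := by
    rw [PySem.List.pyRange_zero_natCast W, List.map_map]
    apply List.map_congr_left
    intro c hc
    simp only [Function.comp_def]
    rw [show colP lines c = lines0.map (fun l0 => (pyLjust l0 W).getD c ' ') from by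
      rw [hlinesdef, colP, List.map_map]; rfl]
    apply List.map_congr_left
    intro l0 _
    by_cases hcl : ((c : Nat) : Int) < (l0.length : Int)
    · rw [if_pos hcl, PySem.List.pyGetD_natCast, pyLjust_getD]
    · rw [if_neg hcl, pyLjust_getD]
      have hle : l0.length ≤ c := by exact_mod_cast not_lt.mp hcl
      rw [List.getD_eq_default _ _ hle]
  rw [hcolsB]
  have hB := foldB (List.replicate lines0.length ' ') (by simp [emptyB])
    ((List.range W).map (colP lines)) 0 []
  rw [hB, zero_add]

-- ===== VERDICT (by name: the statement is the Claim_ definition above) =====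
theorem do_math_homework_spec : Claim_equal_do_math_homework := by
  intro data _hdom hpre
  unfold Spec_do_math_homework do_math_homework do_math_homework_alt
  exact core _ (by simpa using hpre)
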